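-- pv_equiv track=rewrite | github.com/shweta94-source/Scraping | web_scraping/scrap.py | filterSubHeadingIntro
-- ===== SOURCE A (Python) =====
-- def filterSubHeadingIntro(subHeadingIntro):
--     removeStr = len(subHeadingIntro)
--     i = -1
--     subIntro = []
--     lastItem = ""
--     while removeStr > 0:
--         if( len(subHeadingIntro[i]) != 0 ):
--             if(len(subIntro) == 0):
--                 subIntro.append(subHeadingIntro[i])
--                 lastItem = subHeadingIntro[i]
--             else:
--                 subIntro.append(subHeadingIntro[i].replace(lastItem, ""))
--                 lastItem = subHeadingIntro[i]
--         i -= 1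
--         removeStr -= 1
--     subIntro.reverse()
--     return subIntro
-- ===== SOURCE B (Python) =====
-- def filterSubHeadingIntro(subHeadingIntro):
--     # Forward pairwise pass: keep nonempty items, strip each item's successor from it.
--     filtered = [x for x in subHeadingIntro if len(x) != 0]
--     return [cur.replace(nxt, "") for cur, nxt in zip(filtered, filtered[1:])] + filtered[-1:]
-- ===== Notes on version B (the rewrite author's own statement) =====
-- stated objective: simpler
-- what changed: Replaces A's backward while-loop with negative indexing, lastItem accumulator and final list reverse by a single forward filter plus a pairwise zip comprehension (each kept item stripped of its successor, last item kept whole).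
import Mathlib
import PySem

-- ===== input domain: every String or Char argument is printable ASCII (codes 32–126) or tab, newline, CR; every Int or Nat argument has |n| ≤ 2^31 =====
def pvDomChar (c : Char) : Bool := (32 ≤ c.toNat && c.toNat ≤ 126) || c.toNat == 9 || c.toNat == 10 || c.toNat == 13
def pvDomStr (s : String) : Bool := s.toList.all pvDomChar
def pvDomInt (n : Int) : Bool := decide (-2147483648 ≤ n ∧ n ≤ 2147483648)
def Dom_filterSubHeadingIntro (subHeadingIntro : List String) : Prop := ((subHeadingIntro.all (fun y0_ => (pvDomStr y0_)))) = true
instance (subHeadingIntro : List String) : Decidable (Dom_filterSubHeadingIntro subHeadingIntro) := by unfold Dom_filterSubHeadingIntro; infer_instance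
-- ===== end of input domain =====

-- B replaces A's backward index walk + accumulator + final reverse by a forward filter-and-pairwise-zip pass (objective: simpler).

-- ===== PORT A =====
-- the while loop: fuel = removeStr (counts down from len), i the Python index, sub/last the accumulators
def pvLoopA (xs : List String) : Nat → Int → List String → String → List String
  | 0, _, sub, _ => sub
  | n + 1, i, sub, last =>
    match PySem.List.pyGet? xs i with
    | none => sub   -- IndexError; unreachable: every index the loop uses is in range
    | some s =>
      if PySem.Str.len s ≠ 0 then
        if sub.length = 0 then pvLoopA xs n (i - 1) (sub ++ [s]) s
        else pvLoopA xs n (i - 1) (sub ++ [PySem.Str.replace s last ""]) s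
      else pvLoopA xs n (i - 1) sub last

def filterSubHeadingIntro (subHeadingIntro : List String) : List String :=
  (pvLoopA subHeadingIntro subHeadingIntro.length (-1) [] "").reverse

-- ===== PORT B =====
def filterSubHeadingIntro_alt (subHeadingIntro : List String) : List String :=
  let filtered := subHeadingIntro.filter (fun x => PySem.Str.len x ≠ 0)
  ((filtered.zip (PySem.List.slice filtered (some 1) none)).map
      (fun p => PySem.Str.replace p.1 p.2 "")) ++
    PySem.List.slice filtered (some (-1)) none

-- ===== PRECONDITION & SPEC =====
def Spec_filterSubHeadingIntro (subHeadingIntro : List String) (out : List String) : Prop := out = filterSubHeadingIntro_alt subHeadingIntro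
instance (subHeadingIntro : List String) (out : List String) : Decidable (Spec_filterSubHeadingIntro subHeadingIntro out) := by unfold Spec_filterSubHeadingIntro; infer_instance

-- ===== CLAIM (what is proved, stated in full; the proofs are below) =====
def Claim_equal_filterSubHeadingIntro : Prop := ∀ (subHeadingIntro : List String), Dom_filterSubHeadingIntro subHeadingIntro → Spec_filterSubHeadingIntro subHeadingIntro (filterSubHeadingIntro subHeadingIntro)

-- ===== LEMMAS AND PROOFS =====

-- A's loop body on the already-filtered (backward-order) element list
def pvProc : List String → List String → String → List String
  | [], sub, _ => sub
  | s :: g, sub, last =>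
    if sub.length = 0 then pvProc g (sub ++ [s]) s
    else pvProc g (sub ++ [PySem.Str.replace s last ""]) s

-- the tail of A's backward result: each element stripped of the previously seen one
def pvGo (last : String) : List String → List String
  | [] => []
  | c :: t => PySem.Str.replace c last "" :: pvGo c t

def pvRev : List String → List String
  | [] => []
  | a :: r => a :: pvGo a r

-- the initial pairwise segment of B (on l ++ [a])
def pvZi (l : List String) (a : String) : List String :=
  ((l ++ [a]).zip ((l ++ [a]).tail)).map (fun p => PySem.Str.replace p.1 p.2 "")

-- B's core shape
def pvZ (f : List String) : List String :=
  ((f.zip f.tail).map (fun p => PySem.Str.replace p.1 p.2 "")) ++ f.drop (f.length - 1)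

lemma pvLoopA_eq_pvProc (xs : List String) :
    ∀ (n : Nat), n ≤ xs.length → ∀ (sub : List String) (last : String),
      pvLoopA xs n ((n : Int) - xs.length - 1) sub last =
        pvProc (((xs.take n).reverse).filter (fun x => PySem.Str.len x ≠ 0)) sub last := by
  intro n
  induction n with
  | zero => intro _ sub last; simp [pvLoopA, pvProc]
  | succ n ih =>
    intro hn sub last
    have hn' : n < xs.length := by omega
    have hidx : ((n + 1 : Nat) : Int) - xs.length - 1 = -(((xs.length - n : Nat)) : Int) := by
      have : (((xs.length - n : Nat)) : Int) = (xs.length : Int) - n := by omega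
      rw [this]; push_cast; ring
    have hget : PySem.List.pyGet? xs (((n + 1 : Nat) : Int) - xs.length - 1) = some xs[n] := by
      rw [hidx, PySem.List.pyGet?_neg_natCast xs (xs.length - n) (by omega) (by omega)]
      have : xs.length - (xs.length - n) = n := by omega
      rw [this, List.getElem?_eq_getElem hn']
    have htake : (xs.take (n + 1)).reverse = xs[n] :: (xs.take n).reverse := by
      rw [List.take_add_one, List.getElem?_eq_getElem hn']
      simp
    have hstep : ((n + 1 : Nat) : Int) - xs.length - 1 - 1 = (n : Int) - xs.length - 1 := by
      push_cast; ring
    rw [htake]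
    simp only [pvLoopA, hget, hstep]
    by_cases hxe : xs[n] = ""
    · simp [hxe, ih (by omega)]
    · have hlen : ¬ PySem.Str.len xs[n] = 0 := by simpa using hxe
      by_cases hs : sub.length = 0
      · simp [hs, ih (by omega), pvProc, hxe]
      · simp [hs, ih (by omega), pvProc, hxe]

lemma pvProc_acc : ∀ (g sub : List String) (last : String), sub ≠ [] →
    pvProc g sub last = sub ++ pvGo last g := by
  intro g
  induction g with
  | nil => intro sub last _; simp [pvProc, pvGo]
  | cons s g ih =>
    intro sub last hsub
    have h0 : ¬ sub.length = 0 := by simpa [List.length_eq_zero_iff] using hsub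
    simp only [pvProc, h0, if_false, pvGo]
    rw [ih _ _ (by simp)]
    simp

lemma pvProc_nil : ∀ (g : List String) (last : String), pvProc g [] last = pvRev g := by
  intro g last
  cases g with
  | nil => simp [pvProc, pvRev]
  | cons a r =>
    simp only [pvProc, List.length_nil, if_true, List.nil_append, pvRev]
    rw [pvProc_acc r [a] a (by simp)]
    simp

lemma pvZi_cons (x : String) (t : List String) (a : String) :
    pvZi (x :: t) a =
      PySem.Str.replace x ((t ++ [a]).head (by simp)) "" :: pvZi t a := by
  obtain ⟨c, rest, hm⟩ : ∃ c rest, t ++ [a] = c :: rest := by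
    cases t with
    | nil => exact ⟨a, [], rfl⟩
    | cons b t' => exact ⟨b, t' ++ [a], rfl⟩
  simp only [pvZi, List.cons_append, hm]
  simp [List.zip]

lemma pvZi_snoc : ∀ (l : List String) (y a : String),
    pvZi (l ++ [y]) a = pvZi l y ++ [PySem.Str.replace y a ""] := by
  intro l
  induction l with
  | nil =>
    intro y a
    simp [pvZi, List.zip]
  | cons x l ih =>
    intro y a
    rw [List.cons_append, pvZi_cons, pvZi_cons, ih]
    have hhead : ((l ++ [y] ++ [a]).head (by simp)) = ((l ++ [y]).head (by simp)) := by
      cases l <;> simp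
    rw [hhead]
    simp

lemma pvGo_reverse : ∀ (r : List String) (a : String),
    (pvGo a r).reverse = pvZi r.reverse a := by
  intro r
  induction r with
  | nil => intro a; simp [pvGo, pvZi]
  | cons c r' ih =>
    intro a
    simp only [pvGo, List.reverse_cons, ih, ← pvZi_snoc]

lemma pvZ_snoc (l : List String) (a : String) :
    pvZ (l ++ [a]) = pvZi l a ++ [a] := by
  simp only [pvZ, pvZi]
  congr 1
  have : (l ++ [a]).length - 1 = l.length := by simp
  rw [this, List.drop_left]

lemma pvRev_reverse : ∀ (g : List String), (pvRev g).reverse = pvZ g.reverse := by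
  intro g
  cases g with
  | nil => simp [pvRev, pvZ]
  | cons a r =>
    simp only [pvRev, List.reverse_cons, pvGo_reverse, pvZ_snoc]

-- ===== VERDICT (by name: the statement is the Claim_ definition above) =====
theorem filterSubHeadingIntro_spec : Claim_equal_filterSubHeadingIntro := by
  intro xs _
  unfold Spec_filterSubHeadingIntro filterSubHeadingIntro filterSubHeadingIntro_alt
  simp only [PySem.List.slice_from_one, PySem.List.slice_from_neg_one]
  have h1 : (-1 : Int) = ((xs.length : Nat) : Int) - xs.length - 1 := by omega
  rw [h1, pvLoopA_eq_pvProc xs xs.length (le_refl _), List.take_length, List.filter_reverse,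
    pvProc_nil, pvRev_reverse, List.reverse_reverse]
  simp only [pvZ]
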